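-- pv_equiv track=rewrite | github.com/StevenXiaoZhao/Problems | 2015/Multiply Strings.py | computeBase
-- ===== SOURCE A (Python) =====
-- def computeBase(num):
--     dict={}
--     dict[0] = [0] * (len(num) + 1)
--     dict[1] = [0] + list(num)
--
--     for i in range(2, 10):
--         add = 0
--         curr = [0]*(len(num) + 1)
--         for j in range(len(num), 0, -1):
--             result = dict[i-1][j] + num[j-1] + add
--             add = result//10
--             curr[j] = result % 10
--         curr[0] = add + dict[i-1][0]
--         dict[i] = curr
--     return dict
-- ===== SOURCE B (Python) =====
-- def computeBase(num):
--     table = {0: [0] * (len(num) + 1), 1: [0] + list(num)}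
--     for i in range(2, 10):
--         carry = 0
--         row = []
--         for d in reversed(num):
--             carry, r = divmod(d * i + carry, 10)
--             row.append(r)
--         table[i] = [carry] + row[::-1]
--     return table
-- ===== Notes on version B (the rewrite author's own statement) =====
-- stated objective: alternative
-- what changed: Each row i (2..9) is computed directly as i*num by single-digit multiplication with carry over reversed(num), instead of A's digit-wise addition of row i-1 to num via indexed writes into a preallocated list; the dependence on the previous row disappears.
import Mathlib
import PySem

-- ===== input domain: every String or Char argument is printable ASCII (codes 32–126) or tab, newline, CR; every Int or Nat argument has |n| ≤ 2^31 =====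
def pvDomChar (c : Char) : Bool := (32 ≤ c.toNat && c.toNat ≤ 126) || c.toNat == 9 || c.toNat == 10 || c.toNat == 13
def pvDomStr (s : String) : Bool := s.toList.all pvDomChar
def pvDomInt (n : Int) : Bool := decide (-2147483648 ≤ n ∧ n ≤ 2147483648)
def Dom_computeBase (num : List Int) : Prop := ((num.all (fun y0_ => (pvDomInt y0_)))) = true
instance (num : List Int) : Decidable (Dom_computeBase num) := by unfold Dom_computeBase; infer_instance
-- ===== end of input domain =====

-- B replaces A's row-by-row addition (row i = row (i-1) + num with carries) by direct
-- single-digit multiplication (row i = i * num with carries), removing the dependence on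
-- the previous row; objective: simpler/alternative.

-- ===== PORT A =====
-- body of A's inner j-loop; indices j (1..len) and j-1 (0..len-1) are always in range,
-- so the total forms pyGetD/pySetD are exact here
def computeBaseStepA (prev num : List Int) (s : Int × List Int) (j : Int) : Int × List Int :=
  let result := PySem.List.pyGetD prev j 0 + PySem.List.pyGetD num (j - 1) 0 + s.1
  (PySem.Int.floordiv result 10, PySem.List.pySetD s.2 j (PySem.Int.mod result 10))

-- body of A's outer loop: the j-loop over range(len(num), 0, -1), then curr[0] = add + prev[0]
def computeBaseRowA (prev num : List Int) : List Int :=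
  let s := (PySem.List.pyRange (num.length : Int) 0 (-1)).foldl (computeBaseStepA prev num)
    (0, List.replicate (num.length + 1) 0)
  PySem.List.pySetD s.2 0 (s.1 + PySem.List.pyGetD prev 0 0)

def computeBase (num : List Int) : List (Int × List Int) :=
  let d : PySem.Dict Int (List Int) :=
    (PySem.Dict.empty.insert 0 (List.replicate (num.length + 1) 0)).insert 1 (0 :: num)
  ((PySem.List.pyRange 2 10 1).foldl
    (fun d i => d.insert i (computeBaseRowA (d.getD (i - 1) []) num)) d).items

-- ===== PORT B =====
-- body of B's inner loop: carry, r = divmod(d*i + carry, 10); row.append(r)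
def computeBaseStepB (i : Int) (s : Int × List Int) (d : Int) : Int × List Int :=
  (PySem.Int.floordiv (d * i + s.1) 10, s.2 ++ [PySem.Int.mod (d * i + s.1) 10])

-- for d in reversed(num): …  then [carry] + row[::-1]
def computeBaseRowB (i : Int) (num : List Int) : List Int :=
  let s := num.reverse.foldl (computeBaseStepB i) (0, [])
  s.1 :: s.2.reverse

def computeBase_alt (num : List Int) : List (Int × List Int) :=
  (PySem.List.pyRange 2 10 1).foldl
    (fun t i => t ++ [(i, computeBaseRowB i num)])
    [(0, List.replicate (num.length + 1) 0), (1, 0 :: num)]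

-- ===== PRECONDITION & SPEC =====
def Spec_computeBase (num : List Int) (out : List (Int × List Int)) : Prop := out = computeBase_alt num
instance (num : List Int) (out : List (Int × List Int)) : Decidable (Spec_computeBase num out) := by unfold Spec_computeBase; infer_instance

-- ===== CLAIM (what is proved, stated in full; the proofs are below) =====
def Claim_equal_computeBase : Prop := ∀ (num : List Int), Dom_computeBase num → Spec_computeBase num (computeBase num)

-- ===== LEMMAS AND PROOFS =====

-- carry chain of adding digit lists ps + ds (least-significant first): (final carry, digits)
def addChain : List Int → List Int → Int → Int × List Int
  | p :: ps, d :: ds, c =>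
    let r := p + d + c
    let t := addChain ps ds (PySem.Int.floordiv r 10)
    (t.1, PySem.Int.mod r 10 :: t.2)
  | _, _, c => (c, [])

-- carry chain of multiplying digit list ds by i (least-significant first)
def mulChain (i : Int) : List Int → Int → Int × List Int
  | d :: ds, c =>
    let r := d * i + c
    let t := mulChain i ds (PySem.Int.floordiv r 10)
    (t.1, PySem.Int.mod r 10 :: t.2)
  | [], c => (c, [])

theorem mulChain_length (i : Int) (ds : List Int) (c : Int) :
    (mulChain i ds c).2.length = ds.length := by
  induction ds generalizing c with
  | nil => rfl
  | cons d ds ih => simp [mulChain, ih]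

theorem addChain_self (ds : List Int) (c : Int) : addChain ds ds c = mulChain 2 ds c := by
  induction ds generalizing c with
  | nil => rfl
  | cons d ds ih =>
    simp only [addChain, mulChain]
    rw [show d + d + c = d * 2 + c by ring, ih]

-- the key identity: adding (k·num)'s digits to num is multiplying by k+1
theorem addChain_mulChain (k : Int) (ds : List Int) :
    ∀ c1 c : Int,
      (addChain (mulChain k ds c1).2 ds c).2 = (mulChain (k + 1) ds (c + c1)).2 ∧
      (addChain (mulChain k ds c1).2 ds c).1 + (mulChain k ds c1).1 = (mulChain (k + 1) ds (c + c1)).1 := by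
  induction ds with
  | nil => intro c1 c; simp [addChain, mulChain]
  | cons d ds ih =>
    intro c1 c
    simp only [mulChain, addChain]
    have hfd : ∀ a : Int, PySem.Int.floordiv a 10 = a / 10 :=
      fun a => PySem.Int.floordiv_eq_ediv_of_pos (by norm_num)
    have hmd : ∀ a : Int, PySem.Int.mod a 10 = a % 10 :=
      fun a => PySem.Int.mod_eq_emod_of_pos (by norm_num)
    set r0 := d * k + c1 with hr0
    have key : d * (k + 1) + (c + c1) = (PySem.Int.mod r0 10 + d + c) + 10 * PySem.Int.floordiv r0 10 := by
      have e1 : d * (k + 1) = d * k + d := by ring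
      rw [e1, hfd, hmd]; omega
    have hmod : PySem.Int.mod (d * (k + 1) + (c + c1)) 10 = PySem.Int.mod (PySem.Int.mod r0 10 + d + c) 10 := by
      rw [key]; simp only [hfd, hmd]; omega
    have hdiv : PySem.Int.floordiv (d * (k + 1) + (c + c1)) 10
        = PySem.Int.floordiv (PySem.Int.mod r0 10 + d + c) 10 + PySem.Int.floordiv r0 10 := by
      rw [key]; simp only [hfd, hmd]; omega
    obtain ⟨h2, h1⟩ := ih (PySem.Int.floordiv r0 10) (PySem.Int.floordiv (PySem.Int.mod r0 10 + d + c) 10)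
    constructor
    · simp only [hmod, ← h2, hdiv]
    · rw [hdiv, ← h1]

theorem foldB_chain (i : Int) (ds : List Int) : ∀ (c : Int) (acc : List Int),
    ds.foldl (computeBaseStepB i) (c, acc) = ((mulChain i ds c).1, acc ++ (mulChain i ds c).2) := by
  induction ds with
  | nil => intro c acc; simp [mulChain]
  | cons d ds ih =>
    intro c acc
    simp only [List.foldl_cons, computeBaseStepB, mulChain, ih]
    simp


theorem rowB_char (i : Int) (num : List Int) :
    computeBaseRowB i num = (mulChain i num.reverse 0).1 :: (mulChain i num.reverse 0).2.reverse := by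
  simp only [computeBaseRowB]
  rw [foldB_chain]
  simp

theorem take1_set (l : List Int) (v : Int) (j : Nat) : (l.set (j+1) v).take 1 = l.take 1 := by
  rw [List.take_set]
  exact List.set_eq_of_length_le (by simp)

theorem drop_set_self (l : List Int) (v : Int) (j : Nat) (h : j + 1 < l.length) :
    (l.set (j+1) v).drop (j+1) = v :: l.drop (j+2) := by
  rw [List.drop_set, if_neg (lt_irrefl _), Nat.sub_self, List.drop_eq_getElem_cons h,
    List.set_cons_zero]

theorem foldA_chain (prev num : List Int) (hp : prev.length = num.length + 1) :
    ∀ (j : Nat), j ≤ num.length → ∀ (add : Int) (curr : List Int), curr.length = num.length + 1 →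
    (PySem.List.pyRange (j : Int) 0 (-1)).foldl (computeBaseStepA prev num) (add, curr) =
      ((addChain ((prev.tail.take j).reverse) ((num.take j).reverse) add).1,
       curr.take 1 ++ (addChain ((prev.tail.take j).reverse) ((num.take j).reverse) add).2.reverse
         ++ curr.drop (j + 1)) := by
  intro j
  induction j generalizing prev num with
  | zero =>
    intro _ add curr hc
    simp only [Int.natCast_zero, PySem.List.pyRange_neg_one_eq_nil (le_refl 0), List.foldl_nil,
      List.take_zero, List.reverse_nil, addChain]
    refine Prod.ext rfl ?_
    show curr = List.take 1 curr ++ [] ++ List.drop (0 + 1) curr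
    rw [List.append_nil, Nat.zero_add, List.take_append_drop]
  | succ j ih =>
    intro hj add curr hc
    have hjn : j < num.length := by omega
    have hjp : j + 1 < prev.length := by omega
    have hjt : j < prev.tail.length := by simp [hp]; omega
    have hjc : j + 1 < curr.length := by omega
    rw [PySem.List.pyRange_neg_one_cons (by exact_mod_cast Nat.cast_pos.mpr (Nat.succ_pos j))]
    simp only [List.foldl_cons, computeBaseStepA]
    have hg1 : PySem.List.pyGetD prev ((j + 1 : Nat) : Int) 0 = prev[j + 1] := by
      rw [PySem.List.pyGetD_natCast]; exact List.getD_eq_getElem _ _ hjp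
    have hg2 : PySem.List.pyGetD num (((j + 1 : Nat) : Int) - 1) 0 = num[j] := by
      rw [show (((j + 1 : Nat) : Int) - 1) = ((j : Nat) : Int) by push_cast; ring]
      rw [PySem.List.pyGetD_natCast]; exact List.getD_eq_getElem _ _ hjn
    have hset : PySem.List.pySetD curr ((j + 1 : Nat) : Int)
        (PySem.Int.mod (prev[j + 1] + num[j] + add) 10) = curr.set (j + 1) _ :=
      PySem.List.pySetD_natCast ..
    rw [hg1, hg2, hset]
    rw [show ((j + 1 : Nat) : Int) - 1 = ((j : Nat) : Int) by push_cast; ring]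
    rw [ih prev num hp (by omega) _ _ (by simp [hc])]
    -- now list algebra
    have htake : prev.tail.take (j + 1) = prev.tail.take j ++ [prev[j + 1]] := by
      rw [List.take_add_one]
      simp [List.getElem?_eq_getElem hjt, List.getElem_tail]
    have hntake : num.take (j + 1) = num.take j ++ [num[j]] := by
      rw [List.take_add_one]; simp [List.getElem?_eq_getElem hjn]
    rw [htake, hntake]
    simp only [List.reverse_append, List.reverse_singleton, List.singleton_append]
    simp only [addChain]
    refine Prod.ext rfl ?_
    simp only [take1_set, drop_set_self curr _ _ hjc, List.reverse_cons, List.append_assoc,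
      List.cons_append, List.nil_append]


theorem rowA_char (prev num : List Int) (hp : prev.length = num.length + 1) :
    computeBaseRowA prev num =
      ((addChain prev.tail.reverse num.reverse 0).1 + prev.getD 0 0) ::
        (addChain prev.tail.reverse num.reverse 0).2.reverse := by
  unfold computeBaseRowA
  rw [foldA_chain prev num hp num.length (le_refl _) 0 _ (by simp)]
  have h1 : prev.tail.take num.length = prev.tail := List.take_of_length_le (by simp [hp])
  have h2 : num.take num.length = num := List.take_length ..
  rw [h1, h2]
  simp only [List.take_replicate, List.drop_replicate]
  simp [PySem.List.pyGetD_zero]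
  simp [PySem.List.pySetD, PySem.List.pySet?, PySem.List.pyIdx?]

theorem row_step2 (num : List Int) :
    computeBaseRowA (0 :: num) num = computeBaseRowB 2 num := by
  rw [rowA_char (0 :: num) num (by simp), rowB_char]
  simp [addChain_self]

theorem row_stepSucc (k : Int) (num : List Int) :
    computeBaseRowA (computeBaseRowB k num) num = computeBaseRowB (k + 1) num := by
  have hlen : (computeBaseRowB k num).length = num.length + 1 := by
    rw [rowB_char]
    simp [mulChain_length]
  rw [rowA_char _ num hlen, rowB_char k num, rowB_char (k + 1) num]
  simp only [List.tail_cons, List.reverse_reverse, List.getD_cons_zero]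
  obtain ⟨h2, h1⟩ := addChain_mulChain k num.reverse 0 0
  rw [h2, h1]
  norm_num

-- ===== VERDICT (by name: the statement is the Claim_ definition above) =====
theorem computeBase_spec : Claim_equal_computeBase := by
  intro num _
  unfold Spec_computeBase computeBase computeBase_alt
  have hr : PySem.List.pyRange 2 10 1 = [2, 3, 4, 5, 6, 7, 8, 9] := by decide
  rw [hr]
  simp only [List.foldl_cons, List.foldl_nil]
  norm_num [PySem.Dict.getD_insert, PySem.Dict.getD_empty]
  have e2 := row_step2 num
  have e3 := row_stepSucc 2 num
  have e4 := row_stepSucc 3 num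
  have e5 := row_stepSucc 4 num
  have e6 := row_stepSucc 5 num
  have e7 := row_stepSucc 6 num
  have e8 := row_stepSucc 7 num
  have e9 := row_stepSucc 8 num
  norm_num at e3 e4 e5 e6 e7 e8 e9
  rw [e2, e3, e4, e5, e6, e7, e8, e9]
  simp [PySem.Dict.empty, PySem.Dict.insert, PySem.Dict.contains]
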